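-- pv_equiv track=rewrite | github.com/mathewphilipc/GaussianFreeField | src/analysis_lib.py | iterative_connected_components
-- ===== SOURCE A (Python) =====
-- def iterative_dfs(graph, start, visited):
--     stack = [start]
--     component = []
--     while stack:
--         node = stack.pop()
--         if not visited[node]:
--             visited[node] = True
--             component.append(node)
--             for neighbor, connected in enumerate(graph[node]):
--                 if connected and not visited[neighbor]:
--                     stack.append(neighbor)
--     return component
--
-- def iterative_connected_components(graph, unoccupied_count):
--     num_nodes = len(graph)
--     visited = [False] * num_nodes
--     component_sizes = []
--
--     for node in range(num_nodes):
--         if not visited[node]: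
--             component = iterative_dfs(graph, node, visited)
--             component_sizes.append(len(component))
--
--     component_count = {}
--     # We don't want to consider unoccupied nodes as lone connected components,
--     # so we finished by subtracting off the number of such nodes.
--     # Actually, that logic is vestigial if we call graph_from_3D_microstate
--     # directly.
--     # component_count[1] = 0
--     for size in component_sizes:
--         component_count[size] = component_count.get(size, 0) + 1
--     # component_count[1] = component_count[1] - unoccupied_count
--
--     return component_count
-- ===== SOURCE B (Python) =====
-- def iterative_connected_components(graph, unoccupied_count):
--     num_nodes = len(graph)
--     visited = [False] * num_nodes
--     component_sizes = []
--
--     for start in range(num_nodes):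
--         if not visited[start]:
--             # level-synchronous BFS: count nodes frontier by frontier
--             visited[start] = True
--             frontier = [start]
--             size = 0
--             while frontier:
--                 size += len(frontier)
--                 new = []
--                 for u in frontier:
--                     for v, connected in enumerate(graph[u]):
--                         if connected and not visited[v]:
--                             visited[v] = True
--                             new.append(v)
--                 frontier = new
--             component_sizes.append(size)
--
--     component_count = {}
--     for size in component_sizes:
--         component_count[size] = component_count.get(size, 0) + 1
--     return component_count
-- ===== Notes on version B (the rewrite author's own statement) =====
-- stated objective: alternative
-- what changed: A explores each component with an iterative LIFO-stack depth-first search collecting the node list and taking its length; B replaces this with a level-synchronous breadth-first search that expands whole frontiers at once and counts nodes directly (summing frontier lengths), never materialising the component list; the histogram accumulation is unchanged. Pre_ excludes inputs where some row has a nonzero entry in a column >= len(graph): both A and B raise IndexError there.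
import Mathlib
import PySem

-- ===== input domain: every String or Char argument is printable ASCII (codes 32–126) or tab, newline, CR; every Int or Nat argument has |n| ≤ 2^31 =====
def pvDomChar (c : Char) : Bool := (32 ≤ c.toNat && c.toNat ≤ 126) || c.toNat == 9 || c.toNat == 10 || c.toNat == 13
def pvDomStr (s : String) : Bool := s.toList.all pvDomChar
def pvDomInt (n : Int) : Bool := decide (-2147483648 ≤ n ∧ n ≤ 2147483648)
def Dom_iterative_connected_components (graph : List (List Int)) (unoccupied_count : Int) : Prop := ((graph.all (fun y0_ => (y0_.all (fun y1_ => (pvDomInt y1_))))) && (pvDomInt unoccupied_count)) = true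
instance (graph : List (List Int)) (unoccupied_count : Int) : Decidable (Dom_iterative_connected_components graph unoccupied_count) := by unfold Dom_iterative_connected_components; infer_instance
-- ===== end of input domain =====

-- B replaces A's LIFO-stack depth-first component exploration by a level-synchronous
-- breadth-first search that counts nodes per frontier instead of collecting the component
-- list (objective: alternative algorithm of the same cost; histogram accumulation unchanged).

-- shared primitive: visited[i] read, total form (outside Pre_ the Pythons raise IndexError)
def pvLookup (v : List Bool) (i : Nat) : Bool := v.getD i true

-- number of unvisited slots; the termination measure of both searches
def pvCF (v : List Bool) : Nat := v.count false

-- marking an unvisited node decreases the number of unvisited slots (cited by both ports' decreasing_by)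
theorem pvCF_set (v : List Bool) (s : Nat) (h : pvLookup v s = false) :
    pvCF (v.set s true) + 1 = pvCF v := by
  induction v generalizing s with
  | nil => simp [pvLookup] at h
  | cons a t ih =>
    cases s with
    | zero =>
      simp [pvLookup] at h
      simp [pvCF, h]
    | succ n =>
      simp only [pvLookup, List.getD] at h
      have := ih n (by simpa [pvLookup] using h)
      simp only [List.set, pvCF, List.count_cons] at *
      omega

theorem pvCF_set_lt (v : List Bool) (s : Nat) (h : pvLookup v s = false) :
    pvCF (v.set s true) < pvCF v := by
  have := pvCF_set v s h; omega

-- ===== PORT A =====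
-- iterative_dfs: stack as a Lean list whose HEAD is the Python list's end (append = cons, pop = head)
def pvDfsLoop (g : List (List Int)) (visited : List Bool) (stack : List Nat) (comp : List Nat) :
    List Bool × List Nat :=
  match stack with
  | [] => (visited, comp)
  | node :: rest =>
    if h : pvLookup visited node then pvDfsLoop g visited rest comp
    else
      let v' := visited.set node true
      pvDfsLoop g v'
        ((PySem.List.enumerate (g.getD node []) 0).foldl
          (fun st p => if p.2 ≠ 0 ∧ pvLookup v' p.1.toNat = false then p.1.toNat :: st else st) rest)
        (comp ++ [node])
termination_by (pvCF visited, stack.length)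
decreasing_by
  · exact Prod.Lex.right _ (Nat.lt_succ_self _)
  · exact Prod.Lex.left _ _ (pvCF_set_lt _ _ (by simpa using h))

-- outer loop of A: thread visited, collect len(component) per fresh start
def pvOuterA (g : List (List Int)) (visited : List Bool) (nodes : List Nat) : List Int :=
  match nodes with
  | [] => []
  | node :: ks =>
    if pvLookup visited node then pvOuterA g visited ks
    else
      let r := pvDfsLoop g visited [node] []
      ((r.2.length : Int)) :: pvOuterA g r.1 ks

-- histogram loop: component_count[size] = component_count.get(size, 0) + 1 (identical in Source A and Source B)
def pvHist (sizes : List Int) : PySem.Dict Int Int :=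
  sizes.foldl (fun d s => d.insert s (d.getD s 0 + 1)) PySem.Dict.empty

def iterative_connected_components (graph : List (List Int)) (unoccupied_count : Int) : List (Int × Int) :=
  (pvHist (pvOuterA graph (List.replicate graph.length false) (List.range graph.length))).items

-- ===== PORT B =====
-- inner for-loop of one frontier node: mark unvisited neighbours, append them to `new`
def pvMarkRow (row : List Int) (st : List Bool × List Nat) : List Bool × List Nat :=
  (PySem.List.enumerate row 0).foldl
    (fun st2 p => if p.2 ≠ 0 ∧ pvLookup st2.1 p.1.toNat = false
                  then (st2.1.set p.1.toNat true, st2.2 ++ [p.1.toNat]) else st2) st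

-- one BFS level: scan every frontier node's row
def pvExpand (g : List (List Int)) (visited : List Bool) (frontier : List Nat) :
    List Bool × List Nat :=
  frontier.foldl (fun st u => pvMarkRow (g.getD u []) st) (visited, [])

-- each marked node is appended exactly once (cited by pvBfs's decreasing_by)
theorem pvMarkFold_cf (l : List (Int × Int)) (st : List Bool × List Nat) :
    pvCF (l.foldl (fun st2 p => if p.2 ≠ 0 ∧ pvLookup st2.1 p.1.toNat = false
                  then (st2.1.set p.1.toNat true, st2.2 ++ [p.1.toNat]) else st2) st).1
      + (l.foldl (fun st2 p => if p.2 ≠ 0 ∧ pvLookup st2.1 p.1.toNat = false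
                  then (st2.1.set p.1.toNat true, st2.2 ++ [p.1.toNat]) else st2) st).2.length
      = pvCF st.1 + st.2.length := by
  induction l generalizing st with
  | nil => rfl
  | cons p l ih =>
    simp only [List.foldl_cons]
    split
    · rename_i hp
      rw [ih]
      have := pvCF_set st.1 p.1.toNat hp.2
      simp only [List.length_append, List.length_cons, List.length_nil]
      omega
    · exact ih st

theorem pvMarkRow_cf (row : List Int) (st : List Bool × List Nat) :
    pvCF (pvMarkRow row st).1 + (pvMarkRow row st).2.length = pvCF st.1 + st.2.length :=
  pvMarkFold_cf _ st

theorem pvExpandFold_cf (g : List (List Int)) (frontier : List Nat) (st : List Bool × List Nat) :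
    pvCF (frontier.foldl (fun st u => pvMarkRow (g.getD u []) st) st).1
      + (frontier.foldl (fun st u => pvMarkRow (g.getD u []) st) st).2.length
      = pvCF st.1 + st.2.length := by
  induction frontier generalizing st with
  | nil => rfl
  | cons u us ih =>
    simp only [List.foldl_cons]
    rw [ih]
    exact pvMarkRow_cf _ st

theorem pvExpand_cf (g : List (List Int)) (visited : List Bool) (frontier : List Nat) :
    pvCF (pvExpand g visited frontier).1 + (pvExpand g visited frontier).2.length
      = pvCF visited := by
  simpa using pvExpandFold_cf g frontier (visited, [])

-- while frontier: size += len(frontier); frontier = newly marked nodes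
def pvBfs (g : List (List Int)) (visited : List Bool) (frontier : List Nat) (size : Int) :
    List Bool × Int :=
  match frontier with
  | [] => (visited, size)
  | a :: l =>
    let r := pvExpand g visited (a :: l)
    pvBfs g r.1 r.2 (size + (a :: l).length)
termination_by (pvCF visited, frontier.length)
decreasing_by
  have h := pvExpand_cf g visited (a :: l)
  rcases hn : (pvExpand g visited (a :: l)).2 with _ | ⟨b, m⟩
  · have he : pvCF (pvExpand g visited (a :: l)).1 = pvCF visited := by
      rw [hn] at h; simpa using h
    rw [he]
    exact Prod.Lex.right _ (by simp)
  · refine Prod.Lex.left _ _ ?_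
    rw [hn] at h; simp at h; omega

def pvOuterB (g : List (List Int)) (visited : List Bool) (nodes : List Nat) : List Int :=
  match nodes with
  | [] => []
  | k :: ks =>
    if pvLookup visited k then pvOuterB g visited ks
    else
      let r := pvBfs g (visited.set k true) [k] 0
      r.2 :: pvOuterB g r.1 ks

def iterative_connected_components_alt (graph : List (List Int)) (unoccupied_count : Int) : List (Int × Int) :=
  (pvHist (pvOuterB graph (List.replicate graph.length false) (List.range graph.length))).items

-- ===== PRECONDITION & SPEC =====
-- Pre_ excludes exactly the inputs where some row has a nonzero entry in a column ≥ len(graph):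
-- there both A and B raise IndexError on visited[neighbor].
def Pre_iterative_connected_components (graph : List (List Int)) (unoccupied_count : Int) : Prop :=
  ∀ row ∈ graph, ∀ j < row.length, row.getD j 0 ≠ 0 → j < graph.length

instance (graph : List (List Int)) (unoccupied_count : Int) : Decidable (Pre_iterative_connected_components graph unoccupied_count) := by
  unfold Pre_iterative_connected_components; infer_instance

def pvWitness_iterative_connected_components : List (List Int) × Int := ([[0, 1], [1, 0]], 0)

def Spec_iterative_connected_components (graph : List (List Int)) (unoccupied_count : Int) (out : List (Int × Int)) : Prop := out = iterative_connected_components_alt graph unoccupied_count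
instance (graph : List (List Int)) (unoccupied_count : Int) (out : List (Int × Int)) : Decidable (Spec_iterative_connected_components graph unoccupied_count out) := by unfold Spec_iterative_connected_components; infer_instance

-- ===== CLAIM (what is proved, stated in full; the proofs are below) =====
def Claim_equal_iterative_connected_components : Prop := ∀ (graph : List (List Int)) (unoccupied_count : Int), Dom_iterative_connected_components graph unoccupied_count → Pre_iterative_connected_components graph unoccupied_count → Spec_iterative_connected_components graph unoccupied_count (iterative_connected_components graph unoccupied_count)

-- ===== LEMMAS AND PROOFS =====

-- edge m → n of the adjacency matrix (out-of-range reads give 0 = no edge)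
def pvE (g : List (List Int)) (m n : Nat) : Prop := (g.getD m []).getD n 0 ≠ 0

-- n reachable from t by edges whose targets are unvisited in v (source unconstrained)
inductive pvReach (g : List (List Int)) (v : List Bool) : Nat → Nat → Prop
  | refl (t : Nat) : pvReach g v t t
  | step {t m n : Nat} : pvReach g v t m → pvE g m n → pvLookup v n = false → pvReach g v t n

theorem pvLookup_lt {v : List Bool} {s : Nat} (h : pvLookup v s = false) : s < v.length := by
  by_contra hs
  simp [pvLookup, List.getD_eq_getElem?_getD, List.getElem?_eq_none (by omega : v.length ≤ s)] at h

theorem pvLookup_set {v : List Bool} {s : Nat} (h : pvLookup v s = false) (j : Nat) :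
    pvLookup (v.set s true) j = if j = s then true else pvLookup v j := by
  have hs := pvLookup_lt h
  by_cases hj : j = s
  · subst hj
    simp [pvLookup, List.getD_eq_getElem?_getD, hs]
  · simp [pvLookup, List.getD_eq_getElem?_getD, List.getElem?_set_ne (fun hh => hj hh.symm), hj]

theorem pvLookup_set_false {v : List Bool} {s : Nat} (h : pvLookup v s = false) {j : Nat}
    (hj : pvLookup (v.set s true) j = false) : pvLookup v j = false := by
  rw [pvLookup_set h j] at hj
  by_cases hjs : j = s <;> simp [hjs] at hj ⊢ <;> exact hj

theorem pvReach_mono {g : List (List Int)} {v w : List Bool} {t i : Nat}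
    (hvw : ∀ j, pvLookup w j = false → pvLookup v j = false) :
    pvReach g w t i → pvReach g v t i := by
  intro h
  induction h with
  | refl => exact pvReach.refl t
  | step _ he hn ih => exact pvReach.step ih he (hvw _ hn)

theorem pvReach_trans {g : List (List Int)} {v : List Bool} {t m i : Nat}
    (h1 : pvReach g v t m) (h2 : pvReach g v m i) : pvReach g v t i := by
  induction h2 with
  | refl => exact h1
  | step _ he hn ih => exact pvReach.step ih he hn

theorem pvReach_src_or {g : List (List Int)} {v : List Bool} {t m : Nat}
    (h : pvReach g v t m) : m = t ∨ pvLookup v m = false := by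
  induction h with
  | refl => exact Or.inl rfl
  | step _ _ hn _ => exact Or.inr hn

-- path surgery: after marking the start, any old path can be shortened past its last visit to k
theorem pvReach_mark {g : List (List Int)} {v : List Bool} {k i : Nat}
    (hk : pvLookup v k = false) (h : pvReach g v k i) :
    i = k ∨ pvReach g (v.set k true) k i := by
  induction h with
  | refl => exact Or.inl rfl
  | step hm he hn ih =>
    rename_i m n
    by_cases hik : n = k
    · exact Or.inl hik
    · right
      have hn' : pvLookup (v.set k true) n = false := by
        rw [pvLookup_set hk n]; simp [hik, hn]
      rcases ih with hmk | hre
      · exact pvReach.step (pvReach.refl k) (hmk ▸ he) hn'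
      · exact pvReach.step hre he hn'

-- length preservation
theorem pvMarkFold_len (l : List (Int × Int)) (st : List Bool × List Nat) :
    (l.foldl (fun st2 p => if p.2 ≠ 0 ∧ pvLookup st2.1 p.1.toNat = false
                  then (st2.1.set p.1.toNat true, st2.2 ++ [p.1.toNat]) else st2) st).1.length
      = st.1.length := by
  induction l generalizing st with
  | nil => rfl
  | cons p l ih =>
    simp only [List.foldl_cons]
    split
    · rw [ih]; simp
    · exact ih st

theorem pvExpand_len (g : List (List Int)) (visited : List Bool) (frontier : List Nat) :
    (pvExpand g visited frontier).1.length = visited.length := by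
  suffices h : ∀ st : List Bool × List Nat,
      (frontier.foldl (fun st u => pvMarkRow (g.getD u []) st) st).1.length = st.1.length by
    exact h (visited, [])
  induction frontier with
  | nil => intro st; rfl
  | cons u us ih =>
    intro st
    simp only [List.foldl_cons]
    rw [ih]
    exact pvMarkFold_len _ st

theorem pvBfs_len (g : List (List Int)) (visited : List Bool) (frontier : List Nat) (size : Int) :
    (pvBfs g visited frontier size).1.length = visited.length := by
  fun_induction pvBfs with
  | case1 => rfl
  | case2 _ _ _ _ _ ih => rw [ih]; apply pvExpand_len

theorem pvDfsLoop_len (g : List (List Int)) (visited : List Bool) (stack : List Nat)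
    (comp : List Nat) : (pvDfsLoop g visited stack comp).1.length = visited.length := by
  fun_induction pvDfsLoop with
  | case1 => rfl
  | case2 => assumption
  | case3 _ _ _ _ _ _ ih => simp only [dite_eq_ite] at ih; rw [ih]; apply List.length_set

-- splitting the 'column k of row (x :: xs) carries an edge' condition at the head
theorem pvExSplit (x : Int) (xs : List Int) (s j : Nat) :
    (∃ k, k < (x :: xs).length ∧ j = s + k ∧ (x :: xs).getD k 0 ≠ 0)
      ↔ ((j = s ∧ x ≠ 0) ∨ (∃ k, k < xs.length ∧ j = (s + 1) + k ∧ xs.getD k 0 ≠ 0)) := by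
  constructor
  · rintro ⟨k, hk, ht, hg⟩
    cases k with
    | zero => left; exact ⟨by omega, by simpa using hg⟩
    | succ j => right; exact ⟨j, by simpa using hk, by omega, by simpa using hg⟩
  · rintro (⟨ht, hx0⟩ | ⟨j, hj, ht, hg⟩)
    · exact ⟨0, by simp, by omega, by simpa using hx0⟩
    · exact ⟨j + 1, by simpa using hj, by omega, by simpa using hg⟩

-- membership in A's neighbour-pushing fold
theorem pvPushFoldGen (row : List Int) (v' : List Bool) (s : Nat) (init : List Nat) (t : Nat) :
    (t ∈ (PySem.List.enumerate row (s : Int)).foldl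
        (fun st p => if p.2 ≠ 0 ∧ pvLookup v' p.1.toNat = false then p.1.toNat :: st else st) init)
      ↔ t ∈ init ∨ ((∃ k, k < row.length ∧ t = s + k ∧ row.getD k 0 ≠ 0) ∧ pvLookup v' t = false) := by
  induction row generalizing s init with
  | nil => simp [PySem.List.enumerate_nil]
  | cons x xs ih =>
    rw [PySem.List.enumerate_cons, List.foldl_cons]
    have hcast : (s : Int) + 1 = ((s + 1 : Nat) : Int) := by push_cast; ring
    rw [hcast]
    simp only [Int.toNat_natCast]
    rw [pvExSplit]
    by_cases hx : x ≠ 0 ∧ pvLookup v' s = false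
    · rw [if_pos hx]
      rw [ih (s + 1) (s :: init)]
      simp only [List.mem_cons]
      by_cases hts : t = s
      · subst hts; simp [hx.1, hx.2]
      · simp [hts]
    · rw [if_neg hx]
      rw [ih (s + 1) init]
      push_neg at hx
      by_cases hts : t = s
      · subst hts
        constructor
        · tauto
        · rintro (h | ⟨(⟨_, hx0⟩ | hk), hl⟩)
          · tauto
          · exact absurd (hx hx0) (by simp [hl])
          · tauto
      · simp [hts]

theorem pvPushFold_mem (row : List Int) (v' : List Bool) (init : List Nat) (t : Nat) :
    (t ∈ (PySem.List.enumerate row 0).foldl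
        (fun st p => if p.2 ≠ 0 ∧ pvLookup v' p.1.toNat = false then p.1.toNat :: st else st) init)
      ↔ t ∈ init ∨ (row.getD t 0 ≠ 0 ∧ pvLookup v' t = false) := by
  have h := pvPushFoldGen row v' 0 init t
  norm_num at h
  rw [h]
  constructor
  · rintro (h1 | ⟨⟨k, hk, rfl, hg⟩, hl⟩)
    · tauto
    · exact Or.inr ⟨hg, hl⟩
  · rintro (h1 | ⟨hg, hl⟩)
    · tauto
    · refine Or.inr ⟨⟨t, ?_, rfl, hg⟩, hl⟩
      by_contra hlt
      rw [List.getD_eq_default _ _ (by omega)] at hg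
      exact hg rfl

-- characterization of B's inner marking fold: final visited and appended nodes
theorem pvMarkFoldGen (row : List Int) (s : Nat) (st : List Bool × List Nat) :
    (∀ j, pvLookup ((PySem.List.enumerate row (s : Int)).foldl
        (fun st2 p => if p.2 ≠ 0 ∧ pvLookup st2.1 p.1.toNat = false
            then (st2.1.set p.1.toNat true, st2.2 ++ [p.1.toNat]) else st2) st).1 j = true
        ↔ pvLookup st.1 j = true ∨ (∃ k, k < row.length ∧ j = s + k ∧ row.getD k 0 ≠ 0)) ∧
    (∀ t, (t ∈ ((PySem.List.enumerate row (s : Int)).foldl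
        (fun st2 p => if p.2 ≠ 0 ∧ pvLookup st2.1 p.1.toNat = false
            then (st2.1.set p.1.toNat true, st2.2 ++ [p.1.toNat]) else st2) st).2)
        ↔ t ∈ st.2 ∨ (pvLookup st.1 t = false ∧ ∃ k, k < row.length ∧ t = s + k ∧ row.getD k 0 ≠ 0)) := by
  induction row generalizing s st with
  | nil => simp [PySem.List.enumerate_nil]
  | cons x xs ih =>
    rw [PySem.List.enumerate_cons, List.foldl_cons]
    have hcast : (s : Int) + 1 = ((s + 1 : Nat) : Int) := by push_cast; ring
    rw [hcast]
    simp only [Int.toNat_natCast]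
    by_cases hx : x ≠ 0 ∧ pvLookup st.1 s = false
    · rw [if_pos hx]
      obtain ⟨ihL, ihM⟩ := ih (s + 1) (st.1.set s true, st.2 ++ [s])
      have hset := pvLookup_set hx.2
      constructor
      · intro j
        rw [ihL j, pvExSplit, hset j]
        by_cases hjs : j = s
        · subst hjs; simp [hx.1]
        · simp [hjs]
      · intro t
        rw [ihM t, pvExSplit, hset t]
        simp only [List.mem_append, List.mem_singleton]
        by_cases hts : t = s
        · subst hts; simp [hx.1, hx.2]
        · simp [hts]
    · rw [if_neg hx]
      obtain ⟨ihL, ihM⟩ := ih (s + 1) st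
      push_neg at hx
      constructor
      · intro j
        rw [ihL j, pvExSplit]
        by_cases hjs : j = s
        · subst hjs
          constructor
          · tauto
          · rintro (h | (⟨_, hx0⟩ | hk))
            · tauto
            · simp [hx hx0]
            · tauto
        · simp [hjs]
      · intro t
        rw [ihM t, pvExSplit]
        by_cases hts : t = s
        · subst hts
          constructor
          · tauto
          · rintro (h | ⟨hl, (⟨_, hx0⟩ | hk)⟩)
            · tauto
            · exact absurd (hx hx0) (by simp [hl])
            · tauto
        · simp [hts]

-- s = 0 wrappers phrased through pvE-style conditions
theorem pvMarkRow_char (row : List Int) (st : List Bool × List Nat) :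
    (∀ j, pvLookup (pvMarkRow row st).1 j = true
        ↔ pvLookup st.1 j = true ∨ row.getD j 0 ≠ 0) ∧
    (∀ t, t ∈ (pvMarkRow row st).2
        ↔ t ∈ st.2 ∨ (pvLookup st.1 t = false ∧ row.getD t 0 ≠ 0)) := by
  obtain ⟨hL, hM⟩ := pvMarkFoldGen row 0 st
  simp only [Nat.cast_zero] at hL hM
  have hiff : ∀ j : Nat, (∃ k, k < row.length ∧ j = 0 + k ∧ row.getD k 0 ≠ 0) ↔ row.getD j 0 ≠ 0 := by
    intro j
    constructor
    · rintro ⟨k, hk, rfl, hg⟩; simpa using hg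
    · intro hg
      refine ⟨j, ?_, by omega, hg⟩
      by_contra hlt
      rw [List.getD_eq_default _ _ (by omega)] at hg
      exact hg rfl
  refine ⟨fun j => ?_, fun t => ?_⟩ <;> unfold pvMarkRow
  · rw [hL j, hiff j]
  · rw [hM t, hiff t]

theorem pvLookup_ext {a b : List Bool} (hl : a.length = b.length)
    (h : ∀ i, pvLookup a i = pvLookup b i) : a = b := by
  apply List.ext_getElem hl
  intro i h1 h2
  have := h i
  rwa [pvLookup, pvLookup, List.getD_eq_getElem?_getD, List.getD_eq_getElem?_getD,
    List.getElem?_eq_getElem h1, List.getElem?_eq_getElem h2] at this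

-- characterization of one whole BFS level (pvExpand)
theorem pvExpandFold_char (g : List (List Int)) (f : List Nat) (st : List Bool × List Nat) :
    (∀ j, pvLookup (f.foldl (fun st u => pvMarkRow (g.getD u []) st) st).1 j = true
        ↔ pvLookup st.1 j = true ∨ ∃ u ∈ f, pvE g u j) ∧
    (∀ t, t ∈ (f.foldl (fun st u => pvMarkRow (g.getD u []) st) st).2
        ↔ t ∈ st.2 ∨ (pvLookup st.1 t = false ∧ ∃ u ∈ f, pvE g u t)) := by
  induction f generalizing st with
  | nil => simp
  | cons u us ih =>
    simp only [List.foldl_cons]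
    obtain ⟨ihL, ihM⟩ := ih (pvMarkRow (g.getD u []) st)
    obtain ⟨hL, hM⟩ := pvMarkRow_char (g.getD u []) st
    have hLs : ∀ t, pvLookup (pvMarkRow (g.getD u []) st).1 t = false
        ↔ (pvLookup st.1 t = false ∧ ¬ pvE g u t) := by
      intro t
      rw [← Bool.not_eq_true, ← Bool.not_eq_true, hL t, pvE]
      tauto
    constructor
    · intro j
      rw [ihL j, hL j]
      constructor
      · rintro ((h | h) | ⟨u', hu', he⟩)
        · exact Or.inl h
        · exact Or.inr ⟨u, by simp, h⟩
        · exact Or.inr ⟨u', by simp [hu'], he⟩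
      · rintro (h | ⟨u', hu', he⟩)
        · exact Or.inl (Or.inl h)
        · rcases List.mem_cons.1 hu' with rfl | hu''
          · exact Or.inl (Or.inr he)
          · exact Or.inr ⟨u', hu'', he⟩
    · intro t
      rw [ihM t, hM t, hLs t]
      constructor
      · rintro ((h | ⟨h1, h2⟩) | ⟨⟨h1, h2⟩, u', hu', he⟩)
        · exact Or.inl h
        · exact Or.inr ⟨h1, u, by simp, h2⟩
        · exact Or.inr ⟨h1, u', by simp [hu'], he⟩
      · rintro (h | ⟨h1, u', hu', he⟩)
        · exact Or.inl (Or.inl h)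
        · rcases List.mem_cons.1 hu' with rfl | hu''
          · exact Or.inl (Or.inr ⟨h1, he⟩)
          · by_cases hut : pvE g u t
            · exact Or.inl (Or.inr ⟨h1, hut⟩)
            · exact Or.inr ⟨⟨h1, hut⟩, u', hu'', he⟩

theorem pvExpand_char (g : List (List Int)) (v : List Bool) (f : List Nat) :
    (∀ j, pvLookup (pvExpand g v f).1 j = true ↔ pvLookup v j = true ∨ ∃ u ∈ f, pvE g u j) ∧
    (∀ t, t ∈ (pvExpand g v f).2 ↔ pvLookup v t = false ∧ ∃ u ∈ f, pvE g u t) := by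
  obtain ⟨hL, hM⟩ := pvExpandFold_char g f (v, [])
  exact ⟨hL, fun t => by simpa using hM t⟩

-- BFS bridge, forward: a v-avoiding path from a visited frontier node survives one expansion
theorem pvBridgeB_fwd {g : List (List Int)} {v v1 : List Bool} {f : List Nat} {new : List Nat}
    (hv1 : ∀ j, pvLookup v1 j = true ↔ pvLookup v j = true ∨ ∃ u ∈ f, pvE g u j)
    (hnew : ∀ t, t ∈ new ↔ pvLookup v t = false ∧ ∃ u ∈ f, pvE g u t)
    {t i : Nat} (htf : t ∈ f) (ht : pvLookup v t = true) (h : pvReach g v t i) :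
    pvLookup v1 i = true ∨ ∃ t' ∈ new, pvReach g v1 t' i := by
  induction h with
  | refl => exact Or.inl ((hv1 t).2 (Or.inl ht))
  | step hm he hn ih =>
    rename_i m n
    by_cases hv1n : pvLookup v1 n = true
    · exact Or.inl hv1n
    · have hv1n' : pvLookup v1 n = false := by simpa using hv1n
      rcases ih with hL | ⟨t', ht', hre⟩
      · -- m is visited after the expansion
        rcases pvReach_src_or hm with rfl | hmv
        · -- m = t ∈ f: n would have been marked, contradiction
          exact absurd ((hv1 n).2 (Or.inr ⟨m, htf, he⟩)) (by simp [hv1n'])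
        · -- m freshly marked: m ∈ new, restart the path at m
          have hmnew : m ∈ new := (hnew m).2 ⟨hmv, by
            rcases (hv1 m).1 hL with hvm | hex
            · exact absurd hvm (by simp [hmv])
            · exact hex⟩
          exact Or.inr ⟨m, hmnew, pvReach.step (pvReach.refl m) he hv1n'⟩
      · exact Or.inr ⟨t', ht', pvReach.step hre he hv1n'⟩

-- visited set computed by pvBfs = old visited ∪ nodes reachable from the frontier
theorem pvBfs_char (g : List (List Int)) (v : List Bool) (f : List Nat) (sz : Int) :
    (∀ t ∈ f, pvLookup v t = true) → ∀ i : Nat,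
    pvLookup (pvBfs g v f sz).1 i = true
      ↔ pvLookup v i = true ∨ ∃ t ∈ f, pvReach g v t i := by
  fun_induction pvBfs with
  | case1 => intro hf i; simp
  | case2 v sz a l r ih =>
    intro hf i
    obtain ⟨hv1, hnew⟩ := pvExpand_char g v (a :: l)
    have hmono : ∀ j, pvLookup (pvExpand g v (a :: l)).1 j = false → pvLookup v j = false := by
      intro j hj
      rw [← Bool.not_eq_true] at hj ⊢
      exact fun hh => hj ((hv1 j).2 (Or.inl hh))
    have hf' : ∀ t ∈ (pvExpand g v (a :: l)).2, pvLookup (pvExpand g v (a :: l)).1 t = true := by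
      intro t htm
      exact (hv1 t).2 (Or.inr ((hnew t).1 htm).2)
    rw [ih hf' i]
    constructor
    · rintro (h1 | ⟨t', ht', hre⟩)
      · rcases (hv1 i).1 h1 with h | ⟨u, hu, he⟩
        · exact Or.inl h
        · by_cases hvi : pvLookup v i = true
          · exact Or.inl hvi
          · exact Or.inr ⟨u, hu, pvReach.step (pvReach.refl u) he (by simpa using hvi)⟩
      · obtain ⟨hvt', u, hu, he⟩ := (hnew t').1 ht'
        refine Or.inr ⟨u, hu, pvReach_trans (pvReach.step (pvReach.refl u) he hvt')
          (pvReach_mono hmono hre)⟩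
    · rintro (h1 | ⟨t, htf, hre⟩)
      · exact Or.inl ((hv1 i).2 (Or.inl h1))
      · exact pvBridgeB_fwd hv1 hnew htf (hf t htf) hre

-- DFS bridge, forward: a v-avoiding path survives popping and marking s
theorem pvBridgeA_fwd {g : List (List Int)} {v : List Bool} {s : Nat}
    (hs : pvLookup v s = false) {t i : Nat} (ht : pvLookup v t = false)
    (h : pvReach g v t i) :
    pvLookup (v.set s true) i = true
      ∨ (pvLookup (v.set s true) t = false ∧ pvReach g (v.set s true) t i)
      ∨ ∃ n, pvE g s n ∧ pvLookup (v.set s true) n = false ∧ pvReach g (v.set s true) n i := by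
  induction h with
  | refl =>
    by_cases hts : t = s
    · subst hts; exact Or.inl (by rw [pvLookup_set hs]; simp)
    · exact Or.inr (Or.inl ⟨by rw [pvLookup_set hs]; simp [hts, ht], pvReach.refl t⟩)
  | step hm he hn ih =>
    rename_i m n
    by_cases hv'n : pvLookup (v.set s true) n = true
    · exact Or.inl hv'n
    · have hv'n' : pvLookup (v.set s true) n = false := by simpa using hv'n
      rcases ih with hL | ⟨ht', hre⟩ | ⟨n', he', hn', hre⟩
      · -- m visited after marking s; but m is v-unvisited on the path, so m = s
        have hmv : pvLookup v m = false := by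
          rcases pvReach_src_or hm with rfl | hmv
          · exact ht
          · exact hmv
        have hms : m = s := by
          by_contra hms
          rw [pvLookup_set hs] at hL
          simp [hms] at hL
          simp [hL] at hmv
        exact Or.inr (Or.inr ⟨n, hms ▸ he, hv'n', pvReach.refl n⟩)
      · exact Or.inr (Or.inl ⟨ht', pvReach.step hre he hv'n'⟩)
      · exact Or.inr (Or.inr ⟨n', he', hn', pvReach.step hre he hv'n'⟩)

-- visited set computed by pvDfsLoop = old visited ∪ nodes reachable from unvisited stack entries
theorem pvDfsLoop_char (g : List (List Int)) (v : List Bool) (st : List Nat) (c : List Nat)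
    (i : Nat) :
    pvLookup (pvDfsLoop g v st c).1 i = true
      ↔ pvLookup v i = true ∨ ∃ t ∈ st, pvLookup v t = false ∧ pvReach g v t i := by
  fun_induction pvDfsLoop with
  | case1 v c => simp
  | case2 v c node rest h ih =>
    rw [ih]
    constructor
    · rintro (h1 | ⟨t, htr, hvt, hre⟩)
      · exact Or.inl h1
      · exact Or.inr ⟨t, by simp [htr], hvt, hre⟩
    · rintro (h1 | ⟨t, htr, hvt, hre⟩)
      · exact Or.inl h1
      · rcases List.mem_cons.1 htr with rfl | htr'
        · rw [h] at hvt; cases hvt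
        · exact Or.inr ⟨t, htr', hvt, hre⟩
  | case3 v c node rest h v' ih =>
    simp only [dite_eq_ite] at ih
    rw [ih]
    have hnode : pvLookup v node = false := by simpa using h
    have hset := pvLookup_set hnode
    have hmono : ∀ j, pvLookup (v.set node true) j = false → pvLookup v j = false :=
      fun j => pvLookup_set_false hnode
    have hmem : ∀ t', t' ∈ (PySem.List.enumerate (g.getD node []) 0).foldl
        (fun st p => if p.2 ≠ 0 ∧ pvLookup (v.set node true) p.1.toNat = false
          then p.1.toNat :: st else st) rest
        ↔ t' ∈ rest ∨ (pvE g node t' ∧ pvLookup (v.set node true) t' = false) :=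
      fun t' => pvPushFold_mem (g.getD node []) (v.set node true) rest t'
    constructor
    · -- after-marking state back to before-marking state
      rintro (h1 | ⟨t', ht', hvt', hre⟩)
      · rw [hset i] at h1
        by_cases his : i = node
        · exact Or.inr ⟨node, by simp, hnode, his ▸ pvReach.refl i⟩
        · rw [if_neg his] at h1
          exact Or.inl h1
      · rcases (hmem t').1 ht' with htr | ⟨he', _⟩
        · exact Or.inr ⟨t', by simp [htr], hmono t' hvt', pvReach_mono hmono hre⟩
        · refine Or.inr ⟨node, by simp, hnode, ?_⟩
          exact pvReach_trans (pvReach.step (pvReach.refl node) he' (hmono t' hvt'))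
            (pvReach_mono hmono hre)
    · rintro (h1 | ⟨t, htmem, hvt, hre⟩)
      · left; rw [hset i]; by_cases his : i = node <;> simp [his, h1]
      · rcases pvBridgeA_fwd hnode hvt hre with hL | ⟨ht', hre'⟩ | ⟨n, he', hn', hre'⟩
        · exact Or.inl hL
        · rcases List.mem_cons.1 htmem with rfl | htr
          · rw [hset t] at ht'; simp at ht'
          · exact Or.inr ⟨t, (hmem t).2 (Or.inl htr), ht', hre'⟩
        · exact Or.inr ⟨n, (hmem n).2 (Or.inr ⟨he', hn'⟩), hn', hre'⟩

-- each component list entry of A corresponds to exactly one freshly marked node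
theorem pvDfsLoop_count (g : List (List Int)) (v : List Bool) (st : List Nat) (c : List Nat) :
    (pvDfsLoop g v st c).2.length + pvCF (pvDfsLoop g v st c).1 = c.length + pvCF v := by
  fun_induction pvDfsLoop with
  | case1 v c => rfl
  | case2 v c node rest h ih => exact ih
  | case3 v c node rest h v' ih =>
    simp only [dite_eq_ite] at ih
    have hs : pvCF v' + 1 = pvCF v := pvCF_set v node (by simpa using h)
    simp only [List.length_append, List.length_cons, List.length_nil] at ih
    omega

-- B's size accumulator counts every node that ever enters a frontier
theorem pvBfs_count (g : List (List Int)) (v : List Bool) (f : List Nat) (sz : Int) :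
    (pvBfs g v f sz).2 + (pvCF (pvBfs g v f sz).1 : Int)
      = sz + (f.length : Int) + (pvCF v : Int) := by
  fun_induction pvBfs with
  | case1 v sz => simp
  | case2 v sz a l r ih =>
    have h : pvCF r.1 + r.2.length = pvCF v := pvExpand_cf g v (a :: l)
    simp only [List.length_cons] at ih ⊢
    omega

-- one fresh start: DFS and BFS mark the same nodes and report the same size
theorem pvStart_visited (g : List (List Int)) (v : List Bool) (k : Nat)
    (hk : pvLookup v k = false) :
    (pvDfsLoop g v [k] []).1 = (pvBfs g (v.set k true) [k] 0).1 := by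
  have hkin := pvLookup_lt hk
  apply pvLookup_ext
  · rw [pvDfsLoop_len, pvBfs_len, List.length_set]
  · intro i
    have hA := pvDfsLoop_char g v [k] [] i
    have hfk : ∀ t ∈ [k], pvLookup (v.set k true) t = true := by
      intro t ht
      rcases List.mem_singleton.1 ht with rfl
      rw [pvLookup_set hk]; simp
    have hB := pvBfs_char g (v.set k true) [k] 0 hfk i
    have hiff : pvLookup (pvDfsLoop g v [k] []).1 i = true
        ↔ pvLookup (pvBfs g (v.set k true) [k] 0).1 i = true := by
      rw [hA, hB]
      simp only [List.mem_singleton, exists_eq_left]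
      constructor
      · rintro (h | ⟨_, hre⟩)
        · left; rw [pvLookup_set hk]; by_cases his : i = k <;> simp [his, h]
        · rcases pvReach_mark hk hre with rfl | hre'
          · left; rw [pvLookup_set hk]; simp
          · exact Or.inr hre'
      · rintro (h | hre)
        · rw [pvLookup_set hk i] at h
          by_cases his : i = k
          · exact Or.inr ⟨hk, his ▸ pvReach.refl i⟩
          · rw [if_neg his] at h; exact Or.inl h
        · exact Or.inr ⟨hk, pvReach_mono (fun j => pvLookup_set_false hk) hre⟩
    cases h1 : pvLookup (pvDfsLoop g v [k] []).1 i <;>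
      cases h2 : pvLookup (pvBfs g (v.set k true) [k] 0).1 i <;> simp_all

theorem pvStart_size (g : List (List Int)) (v : List Bool) (k : Nat)
    (hk : pvLookup v k = false) :
    ((pvDfsLoop g v [k] []).2.length : Int) = (pvBfs g (v.set k true) [k] 0).2 := by
  have hA := pvDfsLoop_count g v [k] []
  have hB := pvBfs_count g (v.set k true) [k] 0
  have hs := pvCF_set v k hk
  have hv : pvCF (pvDfsLoop g v [k] []).1 = pvCF (pvBfs g (v.set k true) [k] 0).1 := by
    rw [pvStart_visited g v k hk]
  simp only [List.length_cons, List.length_nil] at hA hB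
  omega

-- the two outer loops produce the same component_sizes list
theorem pvOuter_eq (g : List (List Int)) (nodes : List Nat) :
    ∀ v : List Bool, pvOuterA g v nodes = pvOuterB g v nodes := by
  induction nodes with
  | nil => intro v; rfl
  | cons k ks ih =>
    intro v
    rw [pvOuterA, pvOuterB]
    by_cases hk : pvLookup v k = true
    · simp only [hk, if_true]
      exact ih v
    · have hk' : pvLookup v k = false := by simpa using hk
      simp only [hk, Bool.false_eq_true, if_false]
      rw [pvStart_size g v k hk', pvStart_visited g v k hk', ih]

-- ===== VERDICT (by name: the statement is the Claim_ definition above) =====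
theorem iterative_connected_components_spec : Claim_equal_iterative_connected_components := by
  intro graph unoccupied_count hdom hpre
  unfold Spec_iterative_connected_components
  unfold iterative_connected_components iterative_connected_components_alt
  rw [pvOuter_eq]
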